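-- pv_equiv track=rewrite | github.com/amlalejini/evolutionary-consequences-of-plasticity | experiments/2021-02-05-hitchhiking/analysis/aggregate.py | build_env_lookup
-- ===== SOURCE A (Python) =====
-- env_order = ["even", "odd"]
--
-- def build_env_lookup(period_length, max_update):
--     lookup = ["all" for i in range(0, max_update+1)]
--     if period_length == 0:
--         return lookup
--     u = 0
--     env_i = 0
--     while u < len(lookup):
--         for pi in range(period_length):
--             if u >= len(lookup): break
--             lookup[u] = env_order[env_i]
--             u+=1
--         env_i = (env_i + 1) % len(env_order)
--     return lookup
-- ===== SOURCE B (Python) =====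
-- env_order = ["even", "odd"]
--
-- def build_env_lookup(period_length, max_update):
--     if period_length == 0:
--         return ["all"] * (max_update + 1)
--     return [env_order[(u // period_length) % 2] for u in range(max_update + 1)]
-- ===== Notes on version B (the rewrite author's own statement) =====
-- stated objective: simpler
-- what changed: Replaces the nested block-filling while/for loop with its env_i toggle state machine by a single comprehension computing each label directly from its index via (u // period_length) % 2.
import Mathlib
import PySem

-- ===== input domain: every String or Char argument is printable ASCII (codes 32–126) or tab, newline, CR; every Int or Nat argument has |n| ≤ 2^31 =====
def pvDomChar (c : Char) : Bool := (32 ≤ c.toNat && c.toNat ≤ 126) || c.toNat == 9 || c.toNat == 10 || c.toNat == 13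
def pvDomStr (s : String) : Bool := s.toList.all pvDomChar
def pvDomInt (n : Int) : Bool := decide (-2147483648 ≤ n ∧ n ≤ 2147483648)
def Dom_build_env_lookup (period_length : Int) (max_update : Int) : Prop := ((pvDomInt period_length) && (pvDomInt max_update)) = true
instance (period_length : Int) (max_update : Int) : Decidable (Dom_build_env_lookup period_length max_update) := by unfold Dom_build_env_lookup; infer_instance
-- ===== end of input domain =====

-- B replaces A's nested block-filling loop (inner for + env_i toggle) with a
-- single pass computing each label from its index by (u // period_length) % 2
-- (objective: simpler).


-- ===== PORT A =====
def env_order : List String := ["even", "odd"]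

-- inner 'for pi in range(period_length)' loop with its 'break'
def innerA : List Int → List String → Int → Int → List String × Int
  | [], lk, u, _ => (lk, u)
  | _ :: rest, lk, u, e =>
    if u ≥ (lk.length : Int) then (lk, u)
    else innerA rest (lk.set u.toNat ((PySem.List.pyGet? env_order e).getD "")) (u + 1) e

-- outer 'while u < len(lookup)' loop; the fuel bounds the iteration count
-- (inside Pre_ the loop terminates and the fuel given below is sufficient)
def outerA (pl : Int) : Nat → List String → Int → Int → List String
  | 0, lk, _, _ => lk
  | fuel + 1, lk, u, e =>
    if u < (lk.length : Int) then
      let r := innerA (PySem.List.pyRange 0 pl 1) lk u e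
      outerA pl fuel r.1 r.2 (PySem.Int.mod (e + 1) 2)
    else lk

def build_env_lookup (period_length : Int) (max_update : Int) : List String :=
  let lookup := (PySem.List.pyRange 0 (max_update + 1) 1).map (fun _ => "all")
  if period_length = 0 then lookup
  else outerA period_length (lookup.length + 1) lookup 0 0

-- ===== PORT B =====
def build_env_lookup_alt (period_length : Int) (max_update : Int) : List String :=
  if period_length = 0 then PySem.List.pyRepeat ["all"] (max_update + 1)
  else (PySem.List.pyRange 0 (max_update + 1) 1).map
    (fun u => (PySem.List.pyGet? env_order
      (PySem.Int.mod (PySem.Int.floordiv u period_length) 2)).getD "")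

-- ===== PRECONDITION & SPEC =====
-- Pre_ excludes period_length < 0 with max_update ≥ 0: exactly the inputs on
-- which A's while loop never terminates (range(period_length) is empty, u
-- never advances), so A returns nothing there.
def Pre_build_env_lookup (period_length : Int) (max_update : Int) : Prop :=
  0 ≤ period_length ∨ max_update < 0
instance (period_length : Int) (max_update : Int) : Decidable (Pre_build_env_lookup period_length max_update) := by unfold Pre_build_env_lookup; infer_instance
def pvWitness_build_env_lookup : Int × Int := (3, 10)

def Spec_build_env_lookup (period_length : Int) (max_update : Int) (out : List String) : Prop := out = build_env_lookup_alt period_length max_update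
instance (period_length : Int) (max_update : Int) (out : List String) : Decidable (Spec_build_env_lookup period_length max_update out) := by unfold Spec_build_env_lookup; infer_instance

-- ===== CLAIM (what is proved, stated in full; the proofs are below) =====
def Claim_equal_build_env_lookup : Prop := ∀ (period_length : Int) (max_update : Int), Dom_build_env_lookup period_length max_update → Pre_build_env_lookup period_length max_update → Spec_build_env_lookup period_length max_update (build_env_lookup period_length max_update)

-- ===== LEMMAS AND PROOFS =====

-- the label A writes throughout block number m (env_i cycles with period 2)
def lab (m : Nat) : String := (PySem.List.pyGet? env_order ((m % 2 : Nat) : Int)).getD ""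

lemma innerA_spec (pis : List Int) (lk : List String) (u : Nat) (e : Int)
    (hu : u ≤ lk.length) :
    innerA pis lk (u : Int) e =
      (lk.mapIdx (fun i x =>
          if u ≤ i ∧ i < u + pis.length then (PySem.List.pyGet? env_order e).getD "" else x),
       (min (u + pis.length) lk.length : Int)) := by
  induction pis generalizing lk u with
  | nil =>
    rw [innerA, Prod.mk.injEq]
    refine ⟨?_, by simp; omega⟩
    apply List.ext_getElem (by simp)
    intro i h1 h2; simp
  | cons hd rest ih =>
    by_cases h : (lk.length : Int) ≤ (u : Int)
    · have heq : u = lk.length := by omega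
      rw [innerA]
      simp only [ge_iff_le, h, if_true, Prod.mk.injEq]
      refine ⟨?_, by simp; omega⟩
      apply List.ext_getElem (by simp)
      intro i h1 h2; simp; omega
    · have hu' : u < lk.length := by omega
      rw [innerA]
      simp only [ge_iff_le, h, if_false]
      have hcast : ((u : Int) + 1) = ((u + 1 : Nat) : Int) := by push_cast; ring
      rw [hcast, Int.toNat_natCast, ih _ (u + 1) (by simp; omega)]
      rw [Prod.mk.injEq]
      refine ⟨?_, by simp; omega⟩
      apply List.ext_getElem (by simp)
      intro i h1 h2
      simp only [List.getElem_mapIdx, List.getElem_set, List.length_cons]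
      split_ifs <;> first | rfl | omega

lemma outerA_drain (pl : Int) (fuel : Nat) (lk : List String) (u e : Int)
    (hu : (lk.length : Int) ≤ u) : outerA pl fuel lk u e = lk := by
  cases fuel with
  | zero => rfl
  | succ n => simp [outerA]; omega

lemma mod_step (m : Nat) : PySem.Int.mod (((m % 2 : Nat) : Int) + 1) 2 = (((m + 1) % 2 : Nat) : Int) := by
  have h1 : (((m % 2 : Nat) : Int) + 1) = ((m % 2 + 1 : Nat) : Int) := by push_cast; ring
  rw [h1]
  have h2 : PySem.Int.mod ((m % 2 + 1 : Nat) : Int) ((2 : Nat) : Int) = (((m % 2 + 1) % 2 : Nat) : Int) :=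
    PySem.Int.mod_natCast _ _
  have h3 : (m % 2 + 1) % 2 = (m + 1) % 2 := by omega
  rw [show ((2:Nat):Int) = (2:Int) by norm_num] at h2
  rw [h2, h3]

lemma div_block (m p i : Nat) (h1 : m * p ≤ i) (h2 : i < m * p + p) :
    i / p = m := by
  have h3 : (m + 1) * p = m * p + p := by ring
  exact Nat.div_eq_of_lt_le h1 (by omega)

lemma outerA_spec (p : Nat) (hp : 1 ≤ p) (fuel : Nat) (lk : List String) (m : Nat)
    (hfuel : lk.length ≤ m * p + fuel) :
    outerA (p : Nat) fuel lk ((m * p : Nat) : Int) ((m % 2 : Nat) : Int)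
      = lk.mapIdx (fun i x => if m * p ≤ i then lab (i / p) else x) := by
  induction fuel generalizing lk m with
  | zero =>
    rw [outerA]
    apply List.ext_getElem (by simp)
    intro i h1 h2
    rw [List.getElem_mapIdx, if_neg (by omega)]
  | succ fuel ih =>
    rw [outerA]
    by_cases h : ((m * p : Nat) : Int) < (lk.length : Int)
    · simp only [h, if_true]
      have hle : m * p ≤ lk.length := by omega
      have hlen : (PySem.List.pyRange 0 (p : Int) 1).length = p := by
        simp [PySem.List.length_pyRange_one]
      rw [innerA_spec _ _ _ _ hle]
      simp only [hlen, mod_step]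
      have hmp : (m + 1) * p = m * p + p := by ring
      have e1 : ((m * p : Nat) : Int) + ((p : Nat) : Int) = (((m + 1) * p : Nat) : Int) := by
        push_cast; ring
      by_cases hc : m * p + p ≤ lk.length
      · rw [e1, show min ((((m + 1) * p : Nat)) : Int) ((lk.length : Nat) : Int) = (((m + 1) * p : Nat) : Int) by omega]
        rw [ih _ (m + 1) (by simp; omega)]
        apply List.ext_getElem (by simp)
        intro i h1 h2
        simp only [List.getElem_mapIdx]
        have hil : i < lk.length := by simpa using h1
        by_cases c1 : (m + 1) * p ≤ i
        · rw [if_pos c1, if_pos (by omega)]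
        · rw [if_neg c1]
          by_cases c2 : m * p ≤ i
          · rw [if_pos (show m * p ≤ i ∧ i < m * p + p by omega), if_pos c2]
            rw [lab, div_block m p i c2 (by omega)]
          · rw [if_neg (show ¬ (m * p ≤ i ∧ i < m * p + p) by omega), if_neg c2]
      · rw [e1, show min ((((m + 1) * p : Nat)) : Int) ((lk.length : Nat) : Int) = ((lk.length : Nat) : Int) by omega]
        rw [outerA_drain _ _ _ _ _ (by simp)]
        apply List.ext_getElem (by simp)
        intro i h1 h2
        simp only [List.getElem_mapIdx]
        have hil : i < lk.length := by simpa using h1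
        by_cases c2 : m * p ≤ i
        · rw [if_pos (show m * p ≤ i ∧ i < m * p + p by omega), if_pos c2]
          rw [lab, div_block m p i c2 (by omega)]
        · rw [if_neg (show ¬ (m * p ≤ i ∧ i < m * p + p) by omega), if_neg c2]
    · simp only [h, if_false]
      apply List.ext_getElem (by simp)
      intro i h1 h2
      rw [List.getElem_mapIdx, if_neg (by omega)]

lemma lookup_replicate (mu : Int) :
    (PySem.List.pyRange 0 (mu + 1) 1).map (fun _ => "all")
      = List.replicate (mu + 1).toNat "all" := by
  rw [PySem.List.pyRange_one, List.map_map]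
  simp [Function.comp_def]

lemma bval (i p : Nat) :
    PySem.Int.mod (PySem.Int.floordiv ((i : Nat) : Int) ((p : Nat) : Int)) 2
      = ((i / p % 2 : Nat) : Int) := by
  rw [PySem.Int.floordiv_natCast]
  exact_mod_cast PySem.Int.mod_natCast (i / p) 2

-- ===== VERDICT (by name: the statement is the Claim_ definition above) =====
theorem build_env_lookup_spec : Claim_equal_build_env_lookup := by
  intro pl mu _ hpre
  unfold Spec_build_env_lookup build_env_lookup build_env_lookup_alt
  by_cases h0 : pl = 0
  · simp only [h0, if_true]
    rw [lookup_replicate, PySem.List.pyRepeat_singleton]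
  · simp only [h0, if_false]
    by_cases hmu : mu + 1 ≤ 0
    · rw [show PySem.List.pyRange 0 (mu + 1) 1 = [] from PySem.List.pyRange_one_eq_nil (by omega)]
      simp [outerA_drain]
    · -- main case: pl ≥ 1 (from Pre_), mu ≥ 0
      have hpl : 1 ≤ pl := by rcases hpre with h | h <;> omega
      set p : Nat := pl.toNat with hpdef
      have hplc : pl = ((p : Nat) : Int) := by omega
      have hp : 1 ≤ p := by omega
      rw [lookup_replicate]
      set n : Nat := (mu + 1).toNat with hndef
      rw [List.length_replicate, hplc]
      have main := outerA_spec p hp (n + 1) (List.replicate n "all") 0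
        (by simp)
      rw [show ((0 * p : Nat) : Int) = (0 : Int) by simp,
          show ((0 % 2 : Nat) : Int) = (0 : Int) by simp] at main
      rw [main]
      apply List.ext_getElem (by simp [PySem.List.length_pyRange_one]; omega)
      intro i h1 h2
      have hin : i < n := by simpa using h1
      rw [List.getElem_mapIdx, if_pos (by omega), List.getElem_map,
          PySem.List.getElem_pyRange_one]
      rw [show (0 : Int) + ((i : Nat) : Int) = ((i : Nat) : Int) by ring, bval]
      rw [lab]
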